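-- pv_equiv track=rewrite | github.com/lucasvillatore/neat-atari-games | space_invaders/training.py | get_total_actions
-- ===== SOURCE A (Python) =====
-- actions = {0:'NOOP', 1:'FIRE', 2:'RIGHT', 3:'LEFT', 4:'RIGHTFIRE', 5:'LEFTFIRE'}
--
-- def get_total_actions(game_actions):
--
--     total_actions = {}
--     for id, action in actions.items():
--         total_actions[action] = game_actions.count(id)
--
--     tmp = ""
--     for action, total in total_actions.items():
--         tmp += "{}: {} - ".format(action, total)
--
--     return tmp
-- ===== SOURCE B (Python) =====
-- actions = {0:'NOOP', 1:'FIRE', 2:'RIGHT', 3:'LEFT', 4:'RIGHTFIRE', 5:'LEFTFIRE'}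
--
-- def get_total_actions(game_actions):
--     # Sort the recognized ids once; since actions iterates its keys in increasing
--     # order, each id's occurrences form one contiguous run, so a single pointer
--     # sweep over the sorted list reads off every count.
--     valid = sorted(x for x in game_actions if x in actions)
--     i = 0
--     tmp = ""
--     for id, action in actions.items():
--         n = 0
--         while i < len(valid) and valid[i] == id:
--             n += 1
--             i += 1
--         tmp += "{}: {} - ".format(action, n)
--     return tmp
-- ===== Notes on version B (the rewrite author's own statement) =====
-- stated objective: alternative
-- what changed: Instead of building a dict from six independent list.count scans, B sorts the recognized action ids once and reads each id's count as the length of its contiguous run during a single pointer sweep over the sorted list.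
import Mathlib
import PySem

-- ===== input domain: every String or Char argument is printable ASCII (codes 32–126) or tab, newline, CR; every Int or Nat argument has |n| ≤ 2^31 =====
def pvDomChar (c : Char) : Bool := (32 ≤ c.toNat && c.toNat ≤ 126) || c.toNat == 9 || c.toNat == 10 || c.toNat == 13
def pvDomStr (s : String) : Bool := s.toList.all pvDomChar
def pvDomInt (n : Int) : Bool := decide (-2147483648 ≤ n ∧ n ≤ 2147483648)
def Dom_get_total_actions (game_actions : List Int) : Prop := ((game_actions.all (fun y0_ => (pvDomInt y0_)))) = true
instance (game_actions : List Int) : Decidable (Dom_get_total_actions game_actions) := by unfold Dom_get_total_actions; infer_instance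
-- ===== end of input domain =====

-- B sorts the recognized ids once and reads each id's count off as the length of its
-- contiguous run in a single pointer sweep, instead of a dict of six independent count scans (objective: alternative).

-- module-level constant 'actions' shared by both versions
def pvActions : PySem.Dict Int String :=
  PySem.Dict.ofList [(0, "NOOP"), (1, "FIRE"), (2, "RIGHT"), (3, "LEFT"), (4, "RIGHTFIRE"), (5, "LEFTFIRE")]

-- ===== PORT A =====
def get_total_actions (game_actions : List Int) : String :=
  (pvActions.items.foldl
      (fun d p => d.insert p.2 ((PySem.List.count game_actions p.1 : Int)))
      PySem.Dict.empty).items.foldl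
    (fun tmp p => tmp ++ p.1 ++ ": " ++ PySem.Int.toStr p.2 ++ " - ") ""

-- ===== PORT B =====
-- valid = sorted(x for x in game_actions if x in actions)
def pvValid (game_actions : List Int) : List Int :=
  PySem.List.sorted (game_actions.filter (fun x => pvActions.contains x)) (fun x => x) false

-- 'while i < len(valid) and valid[i] == id: n += 1; i += 1' — hand-ported while loop,
-- exact because the i < len(valid) guard precedes the indexing, as in the Python.
def pvRun (v : List Int) (id : Int) (n : Int) (i : Nat) : Int × Nat :=
  if h : i < v.length ∧ v.getD i 0 = id then pvRun v id (n + 1) (i + 1) else (n, i)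
termination_by v.length - i
decreasing_by omega

def get_total_actions_alt (game_actions : List Int) : String :=
  (pvActions.items.foldl
      (fun (st : String × Nat) p =>
        let r := pvRun (pvValid game_actions) p.1 0 st.2
        (st.1 ++ p.2 ++ ": " ++ PySem.Int.toStr r.1 ++ " - ", r.2))
      ("", 0)).1

-- ===== PRECONDITION & SPEC =====
def Spec_get_total_actions (game_actions : List Int) (out : String) : Prop := out = get_total_actions_alt game_actions
instance (game_actions : List Int) (out : String) : Decidable (Spec_get_total_actions game_actions out) := by unfold Spec_get_total_actions; infer_instance

-- ===== CLAIM (what is proved, stated in full; the proofs are below) =====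
def Claim_equal_get_total_actions : Prop := ∀ (game_actions : List Int), Dom_get_total_actions game_actions → Spec_get_total_actions game_actions (get_total_actions game_actions)

-- ===== LEMMAS AND PROOFS =====

-- The while loop counts (and skips) exactly the leading run of elements equal to id.
theorem pvRun_eq (v : List Int) (id : Int) (n : Int) (i : Nat) :
    pvRun v id n i = (n + (((v.drop i).takeWhile (fun x => x == id)).length : Int),
                      i + ((v.drop i).takeWhile (fun x => x == id)).length) := by
  induction n, i using pvRun.induct v id with
  | case1 n i h ih =>
    rw [pvRun, dif_pos h, ih]
    have hd : v.drop i = v[i] :: v.drop (i+1) := List.drop_eq_getElem_cons h.1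
    have hg : v[i] = id := by rw [← List.getD_eq_getElem v 0 h.1]; exact h.2
    rw [hd, List.takeWhile_cons, hg]
    simp
    constructor
    · ring
    · omega
  | case2 n i h =>
    rw [pvRun, dif_neg h]
    by_cases hl : i < v.length
    · have hg : ¬ v.getD i 0 = id := fun hc => h ⟨hl, hc⟩
      have hd : v.drop i = v[i] :: v.drop (i+1) := List.drop_eq_getElem_cons hl
      have hg' : (v[i] == id) = false := by
        rw [← List.getD_eq_getElem v 0 hl]; simpa using hg
      rw [hd, List.takeWhile_cons, hg']
      simp
    · have : v.drop i = [] := List.drop_eq_nil_of_le (by omega)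
      rw [this]; simp

-- Dropping the counted run is the same as advancing the pointer past it.
theorem drop_run (v : List Int) (i : Nat) (p : Int → Bool) :
    v.drop (i + ((v.drop i).takeWhile p).length) = (v.drop i).dropWhile p := by
  have key : ∀ w : List Int, w.drop (w.takeWhile p).length = w.dropWhile p := by
    intro w
    induction w with
    | nil => simp
    | cons x t ih =>
      rw [List.takeWhile_cons, List.dropWhile_cons]
      by_cases hx : p x
      · simp [hx, ih]
      · simp [hx]
  have h2 : v.drop (i + ((v.drop i).takeWhile p).length)
      = ((v.drop i).drop ((v.drop i).takeWhile p).length) := by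
    rw [List.drop_drop, Nat.add_comm]
  rw [h2, key]

-- On a sorted list whose elements are all ≥ id, the leading (x == id)-run has length
-- count id, what remains is sorted with all elements ≥ id + 1, and counts of other
-- values are unchanged by dropping the run.
theorem run_split (id : Int) (w : List Int) (hp : w.Pairwise (· ≤ ·)) (hm : ∀ x ∈ w, id ≤ x) :
    (w.takeWhile (fun x => x == id)).length = w.count id
    ∧ (w.dropWhile (fun x => x == id)).Pairwise (· ≤ ·)
    ∧ (∀ x ∈ w.dropWhile (fun x => x == id), id + 1 ≤ x)
    ∧ (∀ j : Int, j ≠ id → (w.dropWhile (fun x => x == id)).count j = w.count j) := by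
  induction w with
  | nil => simp
  | cons x t ih =>
    rw [List.pairwise_cons] at hp
    by_cases hx : x = id
    · subst hx
      have ht := ih hp.2 (fun y hy => hm y (List.mem_cons_of_mem _ hy))
      rw [List.takeWhile_cons, List.dropWhile_cons]
      simp only [BEq.rfl, if_true, List.length_cons, List.count_cons_self]
      refine ⟨by rw [ht.1], ht.2.1, ht.2.2.1, fun j hj => ?_⟩
      rw [ht.2.2.2 j hj]
      simp [Ne.symm hj]
    · have hlt : id < x := lt_of_le_of_ne (hm x (List.mem_cons_self)) (Ne.symm hx)
      have hgt : ∀ y ∈ x :: t, id < y := by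
        intro y hy
        rcases List.mem_cons.mp hy with h | h
        · omega
        · exact lt_of_lt_of_le hlt (hp.1 y h)
      have hnm : id ∉ x :: t := fun hc => absurd rfl (ne_of_gt (hgt id hc))
      have hbx : (x == id) = false := by simpa using hx
      rw [List.takeWhile_cons, List.dropWhile_cons, hbx]
      simp only [Bool.false_eq_true, if_false, List.length_nil]
      refine ⟨?_, ?_, ?_, ?_⟩
      · simp [List.count_eq_zero.mpr hnm]
      · exact List.pairwise_cons.mpr hp
      · intro y hy; have := hgt y hy; omega
      · intro j hj; trivial

-- One sweep step: starting at pointer i on the still-sorted suffix, the loop returns the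
-- count of id in that suffix and leaves a suffix that is sorted, > id, with other counts kept.
theorem step_lemma (v : List Int) (id : Int) (i : Nat)
    (hp : (v.drop i).Pairwise (· ≤ ·)) (hm : ∀ x ∈ v.drop i, id ≤ x) :
    (pvRun v id 0 i).1 = ((v.drop i).count id : Int)
    ∧ (v.drop (pvRun v id 0 i).2).Pairwise (· ≤ ·)
    ∧ (∀ x ∈ v.drop (pvRun v id 0 i).2, id + 1 ≤ x)
    ∧ (∀ j : Int, j ≠ id → (v.drop (pvRun v id 0 i).2).count j = (v.drop i).count j) := by
  obtain ⟨h1, h2, h3, h4⟩ := run_split id (v.drop i) hp hm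
  rw [pvRun_eq]
  refine ⟨?_, ?_, ?_, ?_⟩
  · simp [h1]
  · simpa [drop_run] using h2
  · simpa [drop_run] using h3
  · intro j hj; rw [drop_run]; exact h4 j hj

theorem get_total_actions_spec : Claim_equal_get_total_actions := by
  intro xs _
  unfold Spec_get_total_actions get_total_actions get_total_actions_alt
  set v := pvValid xs with hv
  have hpair : v.Pairwise (· ≤ ·) := PySem.List.sorted_pairwise _ _
  have hcontains : ∀ x : Int, pvActions.contains x = true ↔ (x = 0 ∨ x = 1 ∨ x = 2 ∨ x = 3 ∨ x = 4 ∨ x = 5) := by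
    intro x
    rw [show pvActions = (⟨[((0:Int),"NOOP"),(1,"FIRE"),(2,"RIGHT"),(3,"LEFT"),(4,"RIGHTFIRE"),(5,"LEFTFIRE")]⟩ : PySem.Dict Int String) from rfl,
        PySem.Dict.contains_mk]
    simp
    omega
  have hmem : ∀ x ∈ v, (0:Int) ≤ x := by
    intro x hx
    have hx' := (PySem.List.mem_sorted _ _ _ _).mp hx
    have hcx := (List.mem_filter.mp hx').2
    rcases (hcontains x).mp hcx with h|h|h|h|h|h <;> omega
  have hcnt : ∀ k : Int, pvActions.contains k = true → v.count k = PySem.List.count xs k := by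
    intro k hk
    rw [PySem.List.count_eq, hv]
    unfold pvValid
    rw [List.Perm.count_eq (PySem.List.sorted_perm _ _ _)]
    simp [List.count_filter, hk]
  have hq0 : (v.drop 0).Pairwise (· ≤ ·) := by simpa using hpair
  have hm0 : ∀ x ∈ v.drop 0, (0:Int) ≤ x := by simpa using hmem
  have s0 := step_lemma v 0 0 hq0 hm0
  have hm1 : ∀ x ∈ v.drop (pvRun v 0 0 0).2, (1:Int) ≤ x := by simpa using s0.2.2.1
  have s1 := step_lemma v 1 _ s0.2.1 hm1
  have hm2 : ∀ x ∈ v.drop (pvRun v 1 0 (pvRun v 0 0 0).2).2, (2:Int) ≤ x := by simpa using s1.2.2.1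
  have s2 := step_lemma v 2 _ s1.2.1 hm2
  have hm3 : ∀ x ∈ v.drop (pvRun v 2 0 (pvRun v 1 0 (pvRun v 0 0 0).2).2).2, (3:Int) ≤ x := by
    simpa using s2.2.2.1
  have s3 := step_lemma v 3 _ s2.2.1 hm3
  have hm4 : ∀ x ∈ v.drop (pvRun v 3 0 (pvRun v 2 0 (pvRun v 1 0 (pvRun v 0 0 0).2).2).2).2, (4:Int) ≤ x := by
    simpa using s3.2.2.1
  have s4 := step_lemma v 4 _ s3.2.1 hm4
  have hm5 : ∀ x ∈ v.drop (pvRun v 4 0 (pvRun v 3 0 (pvRun v 2 0 (pvRun v 1 0 (pvRun v 0 0 0).2).2).2).2).2, (5:Int) ≤ x := by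
    simpa using s4.2.2.1
  have s5 := step_lemma v 5 _ s4.2.1 hm5
  -- counts seen at each pointer position equal the global counts
  have f0 : (pvRun v 0 0 0).1 = (PySem.List.count xs 0 : Int) := by
    rw [s0.1, List.drop_zero, hcnt 0 (by decide)]
  have f1 : (pvRun v 1 0 (pvRun v 0 0 0).2).1 = (PySem.List.count xs 1 : Int) := by
    rw [s1.1, s0.2.2.2 1 (by norm_num), List.drop_zero, hcnt 1 (by decide)]
  have f2 : (pvRun v 2 0 (pvRun v 1 0 (pvRun v 0 0 0).2).2).1 = (PySem.List.count xs 2 : Int) := by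
    rw [s2.1, s1.2.2.2 2 (by norm_num), s0.2.2.2 2 (by norm_num), List.drop_zero, hcnt 2 (by decide)]
  have f3 : (pvRun v 3 0 (pvRun v 2 0 (pvRun v 1 0 (pvRun v 0 0 0).2).2).2).1 = (PySem.List.count xs 3 : Int) := by
    rw [s3.1, s2.2.2.2 3 (by norm_num), s1.2.2.2 3 (by norm_num), s0.2.2.2 3 (by norm_num),
        List.drop_zero, hcnt 3 (by decide)]
  have f4 : (pvRun v 4 0 (pvRun v 3 0 (pvRun v 2 0 (pvRun v 1 0 (pvRun v 0 0 0).2).2).2).2).1 = (PySem.List.count xs 4 : Int) := by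
    rw [s4.1, s3.2.2.2 4 (by norm_num), s2.2.2.2 4 (by norm_num), s1.2.2.2 4 (by norm_num),
        s0.2.2.2 4 (by norm_num), List.drop_zero, hcnt 4 (by decide)]
  have f5 : (pvRun v 5 0 (pvRun v 4 0 (pvRun v 3 0 (pvRun v 2 0 (pvRun v 1 0 (pvRun v 0 0 0).2).2).2).2).2).1 = (PySem.List.count xs 5 : Int) := by
    rw [s5.1, s4.2.2.2 5 (by norm_num), s3.2.2.2 5 (by norm_num), s2.2.2.2 5 (by norm_num),
        s1.2.2.2 5 (by norm_num), s0.2.2.2 5 (by norm_num), List.drop_zero, hcnt 5 (by decide)]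
  rw [show pvActions.items = [((0:Int),"NOOP"),(1,"FIRE"),(2,"RIGHT"),(3,"LEFT"),(4,"RIGHTFIRE"),(5,"LEFTFIRE")] from rfl]
  rw [show (List.foldl (fun d p => d.insert p.2 ((PySem.List.count xs p.1 : Int))) PySem.Dict.empty
        [((0:Int),"NOOP"),(1,"FIRE"),(2,"RIGHT"),(3,"LEFT"),(4,"RIGHTFIRE"),(5,"LEFTFIRE")])
      = PySem.Dict.mk [("NOOP", (PySem.List.count xs 0 : Int)), ("FIRE", (PySem.List.count xs 1 : Int)),
          ("RIGHT", (PySem.List.count xs 2 : Int)), ("LEFT", (PySem.List.count xs 3 : Int)),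
          ("RIGHTFIRE", (PySem.List.count xs 4 : Int)), ("LEFTFIRE", (PySem.List.count xs 5 : Int))] from rfl]
  rw [show (PySem.Dict.mk [("NOOP", (PySem.List.count xs 0 : Int)), ("FIRE", (PySem.List.count xs 1 : Int)),
          ("RIGHT", (PySem.List.count xs 2 : Int)), ("LEFT", (PySem.List.count xs 3 : Int)),
          ("RIGHTFIRE", (PySem.List.count xs 4 : Int)), ("LEFTFIRE", (PySem.List.count xs 5 : Int))]).items
      = [("NOOP", (PySem.List.count xs 0 : Int)), ("FIRE", (PySem.List.count xs 1 : Int)),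
          ("RIGHT", (PySem.List.count xs 2 : Int)), ("LEFT", (PySem.List.count xs 3 : Int)),
          ("RIGHTFIRE", (PySem.List.count xs 4 : Int)), ("LEFTFIRE", (PySem.List.count xs 5 : Int))] from rfl]
  simp only [List.foldl]
  rw [f0, f1, f2, f3, f4, f5]
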